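-- pv_equiv track=rewrite | github.com/brayanfa07/IA2-P2 | tec/ic/ia/p2/g05/test.py | win_column
-- ===== SOURCE A (Python) =====
-- def win_column(array, number_to_search):
-- 	row_size = len(array)
-- 	column_size = len(array[0])
-- 	pos_in_row = 0
-- 	pos_in_column = 0
-- 	win_value = False
-- 	while pos_in_column < column_size:
-- 		while (pos_in_row + 3 ) < row_size:
-- 			if (array[pos_in_row][pos_in_column] == number_to_search) and (array[pos_in_row + 1][pos_in_column] == number_to_search) and (array[pos_in_row + 2][pos_in_column] == number_to_search) and (array[pos_in_row + 3][pos_in_column] == number_to_search):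
-- 				win_value = True
-- 				return win_value
-- 			else:
-- 				pos_in_row += 1
-- 		pos_in_row = 0
-- 		pos_in_column += 1
-- 	return win_value
-- ===== SOURCE B (Python) =====
-- def win_column(array, number_to_search):
--     column_size = len(array[0])
--     if len(array) < 4:          # fewer than 4 rows cannot hold a vertical run of 4
--         return False
--     for c in range(column_size):
--         run = 0
--         for row in array:
--             if row[c] == number_to_search:
--                 run += 1
--                 if run == 4:
--                     return True
--             else:
--                 run = 0
--     return False
-- ===== Notes on version B (the rewrite author's own statement) =====
-- stated objective: faster
-- what changed: Replaces the fixed window-of-4 test at every row offset (each cell re-read up to 4 times) with a single running consecutive-count scan per column plus a trivial fewer-than-4-rows early exit, reading each cell once.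
-- outside the precondition, e.g. on win_column([[0], [0], [0], [0], []], 1): A returns False, B raises IndexError
import Mathlib
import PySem

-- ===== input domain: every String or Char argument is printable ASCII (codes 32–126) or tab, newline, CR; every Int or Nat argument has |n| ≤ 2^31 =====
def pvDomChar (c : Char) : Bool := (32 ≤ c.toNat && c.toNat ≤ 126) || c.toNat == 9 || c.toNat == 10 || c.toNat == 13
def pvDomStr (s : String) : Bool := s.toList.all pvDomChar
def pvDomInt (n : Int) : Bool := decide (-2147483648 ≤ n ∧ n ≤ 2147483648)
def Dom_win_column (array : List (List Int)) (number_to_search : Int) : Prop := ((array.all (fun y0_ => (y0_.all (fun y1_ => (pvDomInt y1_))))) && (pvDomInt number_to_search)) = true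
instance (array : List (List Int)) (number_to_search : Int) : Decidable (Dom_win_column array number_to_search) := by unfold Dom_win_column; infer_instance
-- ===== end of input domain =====

-- B replaces A's window-of-4 test at every row offset with a per-column running
-- consecutive-count scan (plus a fewer-than-4-rows early exit), reading each cell once
-- instead of up to four times; objective: faster (constant factor, measured).

-- ===== PORT A =====
-- array[r][c]; under Pre_ every access A performs is in range, so the default 0 is never returned
def pvCell (array : List (List Int)) (r c : Nat) : Int := (array.getD r []).getD c 0

-- inner `while (pos_in_row + 3) < row_size` loop of A
def pvAInner (array : List (List Int)) (n : Int) (rowSize c r : Nat) : Bool :=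
  if r + 3 < rowSize then
    if pvCell array r c = n ∧ pvCell array (r+1) c = n ∧ pvCell array (r+2) c = n ∧ pvCell array (r+3) c = n then
      true
    else pvAInner array n rowSize c (r+1)
  else false
termination_by rowSize - r
decreasing_by omega

-- outer `while pos_in_column < column_size` loop of A
def pvAOuter (array : List (List Int)) (n : Int) (rowSize colSize c : Nat) : Bool :=
  if c < colSize then
    if pvAInner array n rowSize c 0 then true else pvAOuter array n rowSize colSize (c+1)
  else false
termination_by colSize - c
decreasing_by omega

def win_column (array : List (List Int)) (number_to_search : Int) : Bool :=
  pvAOuter array number_to_search array.length (array.headD []).length 0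

-- ===== PORT B =====
-- `for row in array` with a running consecutive-match counter
def pvScanCol (rows : List (List Int)) (n : Int) (c : Nat) (run : Nat) : Bool :=
  match rows with
  | [] => false
  | row :: rest =>
    if row.getD c 0 = n then
      if run + 1 = 4 then true else pvScanCol rest n c (run + 1)
    else pvScanCol rest n c 0

-- `for c in range(column_size)`
def pvBOuter (array : List (List Int)) (n : Int) (colSize c : Nat) : Bool :=
  if c < colSize then
    if pvScanCol array n c 0 then true else pvBOuter array n colSize (c+1)
  else false
termination_by colSize - c
decreasing_by omega

def win_column_alt (array : List (List Int)) (number_to_search : Int) : Bool :=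
  if array.length < 4 then false
  else pvBOuter array number_to_search (array.headD []).length 0

-- ===== PRECONDITION & SPEC =====
-- Pre_ excludes the inputs where Python A or Python B raises IndexError: the empty array
-- (both raise on len(array[0])) and, when there are at least 4 rows, ragged arrays with a row
-- shorter than row 0 (B touches every cell of the first len(array[0]) columns; A returns on a
-- few such inputs where its window scan happens never to touch the short row).
def Pre_win_column (array : List (List Int)) (number_to_search : Int) : Prop :=
  array ≠ [] ∧ (4 ≤ array.length → ∀ row ∈ array, (array.headD []).length ≤ row.length)
instance (array : List (List Int)) (number_to_search : Int) : Decidable (Pre_win_column array number_to_search) := by unfold Pre_win_column; infer_instance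

def pvWitness_win_column : List (List Int) × Int := ([[1, 0], [1, 2], [1, 0], [1, 2]], 1)

def Spec_win_column (array : List (List Int)) (number_to_search : Int) (out : Bool) : Prop := out = win_column_alt array number_to_search
instance (array : List (List Int)) (number_to_search : Int) (out : Bool) : Decidable (Spec_win_column array number_to_search out) := by unfold Spec_win_column; infer_instance

-- ===== CLAIM (what is proved, stated in full; the proofs are below) =====
def Claim_equal_win_column : Prop := ∀ (array : List (List Int)) (number_to_search : Int), Dom_win_column array number_to_search → Pre_win_column array number_to_search → Spec_win_column array number_to_search (win_column array number_to_search)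

-- ===== LEMMAS AND PROOFS =====

-- the column c of the array, as a list (default 0 never matters under the in-range uses below)
def pvCol (array : List (List Int)) (c : Nat) : List Int :=
  array.map (fun row => row.getD c 0)

-- "some 4 consecutive entries all equal n"
def pvHas4 (n : Int) : List Int → Bool
  | a :: rest =>
    match rest with
    | b :: c :: d :: _ => if a = n ∧ b = n ∧ c = n ∧ d = n then true else pvHas4 n rest
    | _ => false
  | [] => false

theorem pvHas4_cons4 (n a b c d : Int) (t : List Int) :
    pvHas4 n (a :: b :: c :: d :: t)
      = if a = n ∧ b = n ∧ c = n ∧ d = n then true else pvHas4 n (b :: c :: d :: t) := rfl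

theorem pvHas4_short (n : Int) (l : List Int) (h : l.length < 4) : pvHas4 n l = false := by
  rcases l with _ | ⟨a, _ | ⟨b, _ | ⟨c, _ | ⟨d, t⟩⟩⟩⟩
  · rfl
  · rfl
  · rfl
  · rfl
  · exact absurd h (by simp)

theorem pvHas4_skip (n x : Int) (hx : ¬ x = n) (run : Nat) (hrun : run ≤ 3) (l : List Int) :
    pvHas4 n (List.replicate run n ++ x :: l) = pvHas4 n l := by
  interval_cases run <;>
    rcases l with _ | ⟨a, _ | ⟨b, _ | ⟨c, t⟩⟩⟩ <;> simp [pvHas4, hx]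

theorem pvCol_cons (row : List Int) (rest : List (List Int)) (c : Nat) :
    pvCol (row :: rest) c = row.getD c 0 :: pvCol rest c := rfl

theorem pvScanCol_eq_has4 (n : Int) (c : Nat) :
    ∀ (rows : List (List Int)) (run : Nat), run ≤ 3 →
      pvScanCol rows n c run = pvHas4 n (List.replicate run n ++ pvCol rows c) := by
  intro rows
  induction rows with
  | nil =>
      intro run hrun
      have hlt : (List.replicate run n ++ pvCol ([] : List (List Int)) c).length < 4 := by
        simp [pvCol]; omega
      rw [pvHas4_short n _ hlt]; rfl
  | cons row rest ih =>
      intro run hrun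
      by_cases hx : row.getD c 0 = n
      · have hcol : pvCol (row :: rest) c = n :: pvCol rest c := by rw [pvCol_cons, hx]
        by_cases h4 : run + 1 = 4
        · have hr : run = 3 := by omega
          subst hr
          rw [pvScanCol, if_pos hx, if_pos h4, hcol]
          simp [pvHas4, List.replicate]
        · have hstep := ih (run + 1) (by omega)
          rw [pvScanCol, if_pos hx, if_neg h4, hstep, hcol,
            List.replicate_succ', List.append_assoc]
          rfl
      · have hstep := ih 0 (by omega)
        simp only [List.replicate, List.nil_append] at hstep
        rw [pvScanCol, if_neg hx, hstep, pvCol_cons, pvHas4_skip n _ hx run hrun]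

theorem pvCell_eq_col (array : List (List Int)) (r c : Nat) :
    pvCell array r c = (pvCol array c).getD r 0 := by
  by_cases h : r < array.length
  · have hc : r < (pvCol array c).length := by simpa [pvCol] using h
    rw [pvCell, List.getD_eq_getElem _ _ hc]
    simp only [pvCol, List.getElem_map]
    rw [List.getD_eq_getElem _ _ h]
  · have h1 : array[r]? = none := List.getElem?_eq_none (by omega)
    have h2 : (pvCol array c)[r]? = none := List.getElem?_eq_none (by simp [pvCol]; omega)
    simp [pvCell, List.getD_eq_getElem?_getD, h1, h2]

theorem pvAInner_eq_has4 (array : List (List Int)) (n : Int) (c : Nat) :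
    ∀ r, pvAInner array n array.length c r = pvHas4 n ((pvCol array c).drop r) := by
  have hlen : (pvCol array c).length = array.length := by simp [pvCol]
  intro r
  induction hw : array.length - r using Nat.strong_induction_on generalizing r with
  | _ k ih =>
    rw [pvAInner]
    by_cases h : r + 3 < array.length
    · have hb0 : r < (pvCol array c).length := by omega
      have hb1 : r + 1 < (pvCol array c).length := by omega
      have hb2 : r + 2 < (pvCol array c).length := by omega
      have hb3 : r + 3 < (pvCol array c).length := by omega
      have e0 : pvCell array r c = (pvCol array c)[r]'hb0 := by
        rw [pvCell_eq_col]; exact List.getD_eq_getElem _ _ hb0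
      have e1 : pvCell array (r+1) c = (pvCol array c)[r+1]'hb1 := by
        rw [pvCell_eq_col]; exact List.getD_eq_getElem _ _ hb1
      have e2 : pvCell array (r+2) c = (pvCol array c)[r+2]'hb2 := by
        rw [pvCell_eq_col]; exact List.getD_eq_getElem _ _ hb2
      have e3 : pvCell array (r+3) c = (pvCol array c)[r+3]'hb3 := by
        rw [pvCell_eq_col]; exact List.getD_eq_getElem _ _ hb3
      have d0 : (pvCol array c).drop r = (pvCol array c)[r]'hb0 :: (pvCol array c).drop (r+1) :=
        List.drop_eq_getElem_cons hb0
      have d1 : (pvCol array c).drop (r+1) = (pvCol array c)[r+1]'hb1 :: (pvCol array c).drop (r+2) :=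
        List.drop_eq_getElem_cons hb1
      have d2 : (pvCol array c).drop (r+2) = (pvCol array c)[r+2]'hb2 :: (pvCol array c).drop (r+3) :=
        List.drop_eq_getElem_cons hb2
      have d3 : (pvCol array c).drop (r+3) = (pvCol array c)[r+3]'hb3 :: (pvCol array c).drop (r+4) :=
        List.drop_eq_getElem_cons hb3
      have ihr := ih (array.length - (r+1)) (by omega) (r+1) rfl
      rw [if_pos h, e0, e1, e2, e3, d0, d1, d2, d3, pvHas4_cons4, ← d3, ← d2, ← d1, ihr]
    · have hlt : ((pvCol array c).drop r).length < 4 := by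
        rw [List.length_drop, hlen]; omega
      rw [if_neg h, pvHas4_short n _ hlt]

theorem pvOuter_eq (array : List (List Int)) (n : Int) (colSize : Nat) :
    ∀ c, pvAOuter array n array.length colSize c = pvBOuter array n colSize c := by
  intro c
  induction hw : colSize - c using Nat.strong_induction_on generalizing c with
  | _ k ih =>
    rw [pvAOuter, pvBOuter]
    by_cases h : c < colSize
    · have hin : pvAInner array n array.length c 0 = pvScanCol array n c 0 := by
        rw [pvAInner_eq_has4, pvScanCol_eq_has4 n c array 0 (by omega)]
        rfl
      rw [if_pos h, if_pos h, hin, ih (colSize - (c+1)) (by omega) (c+1) rfl]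
    · rw [if_neg h, if_neg h]

theorem pvAOuter_small (array : List (List Int)) (n : Int) (hs : array.length < 4)
    (colSize : Nat) : ∀ c, pvAOuter array n array.length colSize c = false := by
  intro c
  induction hw : colSize - c using Nat.strong_induction_on generalizing c with
  | _ k ih =>
    rw [pvAOuter]
    by_cases h : c < colSize
    · have hi : pvAInner array n array.length c 0 = false := by
        rw [pvAInner, if_neg (by omega : ¬ (0 + 3 < array.length))]
      rw [if_pos h, hi]
      simpa using ih (colSize - (c+1)) (by omega) (c+1) rfl
    · rw [if_neg h]

theorem win_column_eq_alt (array : List (List Int)) (n : Int) :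
    win_column array n = win_column_alt array n := by
  unfold win_column win_column_alt
  by_cases hs : array.length < 4
  · rw [if_pos hs, pvAOuter_small array n hs]
  · rw [if_neg hs, pvOuter_eq array n]

-- ===== VERDICT (by name: the statement is the Claim_ definition above) =====
theorem win_column_spec : Claim_equal_win_column := by
  intro array n _ _
  unfold Spec_win_column
  exact win_column_eq_alt array n
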